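-- pv_equiv track=rewrite | github.com/luch91/RAG-Clinical-Nutrition-Assistant | app/components/step_by_step_collector_NEW.py | _get_biomarker_questions_FIXED
-- ===== SOURCE A (Python) =====
-- def _get_biomarker_questions_FIXED(diagnosis: str):
--     """Get diagnosis-specific biomarker questions for ALL 8 supported conditions"""
--     questions = []
--
--     diagnosis_lower = (diagnosis or "").lower()
--
--     # 1. Type 1 Diabetes
--     if "diabet" in diagnosis_lower or "t1d" in diagnosis_lower or "iddm" in diagnosis_lower:
--         questions.extend([
--             {"slot": "hba1c"},
--             {"slot": "glucose"}
--         ])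
--
--     # 2. Chronic Kidney Disease (CKD)
--     elif "ckd" in diagnosis_lower or "kidney" in diagnosis_lower or "renal" in diagnosis_lower:
--         questions.extend([
--             {"slot": "creatinine"},
--             {"slot": "egfr"},
--             {"slot": "potassium"},
--             {"slot": "phosphorus"}
--         ])
--
--     # 3. Inherited Metabolic Disorders (PKU, MSUD, Galactosemia) - CHECK BEFORE EPILEPSY
--     # CRITICAL: Must be before epilepsy check because "keto" in epilepsy matches "phenylKETOnuria"
--     elif any(term in diagnosis_lower for term in ["pku", "phenylketonuria", "msud", "maple syrup", "galactosemia", "metabolic disorder", "inborn error"]):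
--         # PKU-specific
--         if "pku" in diagnosis_lower or "phenylketonuria" in diagnosis_lower:
--             questions.extend([
--                 {"slot": "phenylalanine"},
--                 {"slot": "tyrosine"}
--             ])
--
--         # MSUD-specific
--         elif "msud" in diagnosis_lower or "maple syrup" in diagnosis_lower:
--             questions.extend([
--                 {"slot": "leucine"},
--                 {"slot": "isoleucine"},
--                 {"slot": "valine"}
--             ])
--
--         # Galactosemia-specific
--         elif "galactosemia" in diagnosis_lower:
--             questions.extend([
--                 {"slot": "galactose_1_phosphate"},
--                 {"slot": "galt_activity"}
--             ])
--
--         # General metabolic markers (for all IEMs)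
--         questions.append({"slot": "albumin"})
--
--     # 4. Epilepsy / Ketogenic Therapy - AFTER metabolic disorders
--     elif "epilep" in diagnosis_lower or "seizure" in diagnosis_lower or "ketogenic" in diagnosis_lower or "keto" in diagnosis_lower:
--         questions.extend([
--             {"slot": "aed_level"},
--             {"slot": "ketone_level"},
--             {"slot": "seizure_frequency"}
--         ])
--
--     # 5. Cystic Fibrosis (CF)
--     elif "cystic fibrosis" in diagnosis_lower or ("cf" in diagnosis_lower and len(diagnosis_lower) <= 5) or "cftr" in diagnosis_lower:
--         questions.extend([
--             {"slot": "fev1"},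
--             {"slot": "pancreatic_status"},
--             {"slot": "vitamin_d"},
--             {"slot": "vitamin_a"}
--         ])
--
--     # 6. Preterm Nutrition
--     elif "preterm" in diagnosis_lower or "premature" in diagnosis_lower or "nicu" in diagnosis_lower or "preemie" in diagnosis_lower:
--         questions.extend([
--             {"slot": "gestational_age"},
--             {"slot": "corrected_age"},
--             {"slot": "feeding_method"},
--             {"slot": "hemoglobin"}
--         ])
--
--     # 7. Food Allergy
--     elif "food allerg" in diagnosis_lower or ("allergic" in diagnosis_lower and "food" not in diagnosis_lower) or "anaphylaxis" in diagnosis_lower: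
--         questions.extend([
--             {"slot": "allergen_type"},
--             {"slot": "ige_level"},
--             {"slot": "reaction_severity"}
--         ])
--
--     # 8. GI Disorders (IBD, GERD, Crohn's, Ulcerative Colitis)
--     elif any(term in diagnosis_lower for term in ["ibd", "crohn", "ulcerative colitis", "gerd", "reflux", "inflammatory bowel"]):
--         # IBD-specific (Crohn's, UC)
--         if any(term in diagnosis_lower for term in ["ibd", "crohn", "ulcerative colitis", "inflammatory bowel"]):
--             questions.extend([
--                 {"slot": "crp"},
--                 {"slot": "esr"},
--                 {"slot": "fecal_calprotectin"},
--                 {"slot": "albumin"}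
--             ])
--
--         # GERD-specific
--         if "gerd" in diagnosis_lower or "reflux" in diagnosis_lower:
--             questions.append({"slot": "symptom_frequency"})
--
--     return [q["slot"] for q in questions]
-- ===== SOURCE B (Python) =====
-- # Collect ALL matching categories from a flat keyword->category table, then pick
-- # the highest-priority one (numeric min); slot lists live in a separate table.
-- _KEYWORDS = [
--     ("diabet", 1), ("t1d", 1), ("iddm", 1),
--     ("ckd", 2), ("kidney", 2), ("renal", 2),
--     ("pku", 3), ("phenylketonuria", 3), ("msud", 3), ("maple syrup", 3),
--     ("galactosemia", 3), ("metabolic disorder", 3), ("inborn error", 3),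
--     ("epilep", 4), ("seizure", 4), ("ketogenic", 4), ("keto", 4),
--     ("cystic fibrosis", 5), ("cftr", 5),
--     ("preterm", 6), ("premature", 6), ("nicu", 6), ("preemie", 6),
--     ("food allerg", 7), ("anaphylaxis", 7),
--     ("ibd", 8), ("crohn", 8), ("ulcerative colitis", 8), ("gerd", 8),
--     ("reflux", 8), ("inflammatory bowel", 8),
-- ]
--
-- _STATIC_SLOTS = {
--     1: ["hba1c", "glucose"],
--     2: ["creatinine", "egfr", "potassium", "phosphorus"],
--     4: ["aed_level", "ketone_level", "seizure_frequency"],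
--     5: ["fev1", "pancreatic_status", "vitamin_d", "vitamin_a"],
--     6: ["gestational_age", "corrected_age", "feeding_method", "hemoglobin"],
--     7: ["allergen_type", "ige_level", "reaction_severity"],
-- }
--
-- def _get_biomarker_questions_FIXED(diagnosis: str):
--     """Get diagnosis-specific biomarker questions for ALL 8 supported conditions."""
--     d = (diagnosis or "").lower()
--     hits = [cat for term, cat in _KEYWORDS if term in d] \
--         + ([5] if ("cf" in d and len(d) <= 5) else []) \
--         + ([7] if ("allergic" in d and "food" not in d) else [])
--     cat = min(hits, default=9)
--     if cat == 3:
--         if "pku" in d or "phenylketonuria" in d: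
--             specific = ["phenylalanine", "tyrosine"]
--         elif "msud" in d or "maple syrup" in d:
--             specific = ["leucine", "isoleucine", "valine"]
--         elif "galactosemia" in d:
--             specific = ["galactose_1_phosphate", "galt_activity"]
--         else:
--             specific = []
--         return specific + ["albumin"]
--     if cat == 8:
--         slots = []
--         if any(t in d for t in ("ibd", "crohn", "ulcerative colitis", "inflammatory bowel")):
--             slots += ["crp", "esr", "fecal_calprotectin", "albumin"]
--         if "gerd" in d or "reflux" in d:
--             slots.append("symptom_frequency")
--         return slots
--     return _STATIC_SLOTS.get(cat, [])
-- ===== Notes on version B (the rewrite author's own statement) =====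
-- stated objective: alternative
-- what changed: Instead of A's ordered elif cascade that accumulates one-key dicts and unwraps them in a final comprehension, B scans one flat keyword-to-category table, collects the set of ALL matching categories, picks the winning condition as the numeric minimum (priority = category number), and looks the slot list up in a separate static table.
import Mathlib
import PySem

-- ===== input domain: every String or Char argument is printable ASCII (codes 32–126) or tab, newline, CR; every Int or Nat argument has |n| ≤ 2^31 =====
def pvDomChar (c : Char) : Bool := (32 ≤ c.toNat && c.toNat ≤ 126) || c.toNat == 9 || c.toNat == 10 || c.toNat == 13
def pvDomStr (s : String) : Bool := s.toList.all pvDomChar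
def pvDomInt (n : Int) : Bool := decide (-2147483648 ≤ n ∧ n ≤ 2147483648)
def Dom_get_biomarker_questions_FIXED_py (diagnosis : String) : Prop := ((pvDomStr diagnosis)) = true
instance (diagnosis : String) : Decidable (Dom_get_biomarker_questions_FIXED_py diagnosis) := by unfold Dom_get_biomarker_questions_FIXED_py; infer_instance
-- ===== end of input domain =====

-- B replaces A's first-match elif cascade by a different algorithm: it collects ALL
-- matching categories from a flat keyword→category table, picks the highest-priority
-- one as the numeric minimum, and looks the slot list up in a separate table; objective: simpler.

-- ===== PORT A =====
-- A builds a list of one-entry dicts {"slot": v}; every dict contains "slot", so the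
-- final comprehension q["slot"] never raises; ported as getD with an unused default.
def get_biomarker_questions_FIXED_py (diagnosis : String) : List String :=
  let dl := PySem.Str.lower (if diagnosis = "" then "" else diagnosis)
  let questions : List (PySem.Dict String String) :=
    if PySem.Str.isIn "diabet" dl || PySem.Str.isIn "t1d" dl || PySem.Str.isIn "iddm" dl then
      [PySem.Dict.ofList [("slot", "hba1c")], PySem.Dict.ofList [("slot", "glucose")]]
    else if PySem.Str.isIn "ckd" dl || PySem.Str.isIn "kidney" dl || PySem.Str.isIn "renal" dl then
      [PySem.Dict.ofList [("slot", "creatinine")], PySem.Dict.ofList [("slot", "egfr")],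
       PySem.Dict.ofList [("slot", "potassium")], PySem.Dict.ofList [("slot", "phosphorus")]]
    else if ["pku", "phenylketonuria", "msud", "maple syrup", "galactosemia",
             "metabolic disorder", "inborn error"].any (fun t => PySem.Str.isIn t dl) then
      (if PySem.Str.isIn "pku" dl || PySem.Str.isIn "phenylketonuria" dl then
        [PySem.Dict.ofList [("slot", "phenylalanine")], PySem.Dict.ofList [("slot", "tyrosine")]]
       else if PySem.Str.isIn "msud" dl || PySem.Str.isIn "maple syrup" dl then
        [PySem.Dict.ofList [("slot", "leucine")], PySem.Dict.ofList [("slot", "isoleucine")],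
         PySem.Dict.ofList [("slot", "valine")]]
       else if PySem.Str.isIn "galactosemia" dl then
        [PySem.Dict.ofList [("slot", "galactose_1_phosphate")], PySem.Dict.ofList [("slot", "galt_activity")]]
       else []) ++ [PySem.Dict.ofList [("slot", "albumin")]]
    else if PySem.Str.isIn "epilep" dl || PySem.Str.isIn "seizure" dl ||
            PySem.Str.isIn "ketogenic" dl || PySem.Str.isIn "keto" dl then
      [PySem.Dict.ofList [("slot", "aed_level")], PySem.Dict.ofList [("slot", "ketone_level")],
       PySem.Dict.ofList [("slot", "seizure_frequency")]]
    else if PySem.Str.isIn "cystic fibrosis" dl ||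
            (PySem.Str.isIn "cf" dl && decide (PySem.Str.len dl ≤ 5)) || PySem.Str.isIn "cftr" dl then
      [PySem.Dict.ofList [("slot", "fev1")], PySem.Dict.ofList [("slot", "pancreatic_status")],
       PySem.Dict.ofList [("slot", "vitamin_d")], PySem.Dict.ofList [("slot", "vitamin_a")]]
    else if PySem.Str.isIn "preterm" dl || PySem.Str.isIn "premature" dl ||
            PySem.Str.isIn "nicu" dl || PySem.Str.isIn "preemie" dl then
      [PySem.Dict.ofList [("slot", "gestational_age")], PySem.Dict.ofList [("slot", "corrected_age")],
       PySem.Dict.ofList [("slot", "feeding_method")], PySem.Dict.ofList [("slot", "hemoglobin")]]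
    else if PySem.Str.isIn "food allerg" dl ||
            (PySem.Str.isIn "allergic" dl && !PySem.Str.isIn "food" dl) || PySem.Str.isIn "anaphylaxis" dl then
      [PySem.Dict.ofList [("slot", "allergen_type")], PySem.Dict.ofList [("slot", "ige_level")],
       PySem.Dict.ofList [("slot", "reaction_severity")]]
    else if ["ibd", "crohn", "ulcerative colitis", "gerd", "reflux",
             "inflammatory bowel"].any (fun t => PySem.Str.isIn t dl) then
      (if ["ibd", "crohn", "ulcerative colitis",
           "inflammatory bowel"].any (fun t => PySem.Str.isIn t dl) then
        [PySem.Dict.ofList [("slot", "crp")], PySem.Dict.ofList [("slot", "esr")],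
         PySem.Dict.ofList [("slot", "fecal_calprotectin")], PySem.Dict.ofList [("slot", "albumin")]]
       else []) ++
      (if PySem.Str.isIn "gerd" dl || PySem.Str.isIn "reflux" dl then
        [PySem.Dict.ofList [("slot", "symptom_frequency")]]
       else [])
    else []
  questions.map (fun q => PySem.Dict.getD q "slot" "")

-- ===== PORT B =====
-- flat keyword → category table (_KEYWORDS in Source B)
def pvKeywords : List (String × Int) :=
  [("diabet", 1), ("t1d", 1), ("iddm", 1),
   ("ckd", 2), ("kidney", 2), ("renal", 2),
   ("pku", 3), ("phenylketonuria", 3), ("msud", 3), ("maple syrup", 3),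
   ("galactosemia", 3), ("metabolic disorder", 3), ("inborn error", 3),
   ("epilep", 4), ("seizure", 4), ("ketogenic", 4), ("keto", 4),
   ("cystic fibrosis", 5), ("cftr", 5),
   ("preterm", 6), ("premature", 6), ("nicu", 6), ("preemie", 6),
   ("food allerg", 7), ("anaphylaxis", 7),
   ("ibd", 8), ("crohn", 8), ("ulcerative colitis", 8), ("gerd", 8),
   ("reflux", 8), ("inflammatory bowel", 8)]

-- _STATIC_SLOTS in Source B
def pvStaticSlots : PySem.Dict Int (List String) :=
  PySem.Dict.ofList
    [(1, ["hba1c", "glucose"]),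
     (2, ["creatinine", "egfr", "potassium", "phosphorus"]),
     (4, ["aed_level", "ketone_level", "seizure_frequency"]),
     (5, ["fev1", "pancreatic_status", "vitamin_d", "vitamin_a"]),
     (6, ["gestational_age", "corrected_age", "feeding_method", "hemoglobin"]),
     (7, ["allergen_type", "ige_level", "reaction_severity"])]

-- hits = [cat for term, cat in _KEYWORDS if term in d] + guard appends
def pvHits (d : String) : List Int :=
  pvKeywords.filterMap (fun p => if PySem.Str.isIn p.1 d then some p.2 else none)
  ++ (if PySem.Str.isIn "cf" d && decide (PySem.Str.len d ≤ 5) then [(5 : Int)] else [])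
  ++ (if PySem.Str.isIn "allergic" d && !PySem.Str.isIn "food" d then [(7 : Int)] else [])

-- cat = min(hits, default=9)
def pvCat (d : String) : Int := (PySem.List.min? (pvHits d) (fun x => x)).getD 9

def get_biomarker_questions_FIXED_py_alt (diagnosis : String) : List String :=
  let d := PySem.Str.lower (if diagnosis = "" then "" else diagnosis)
  let cat := pvCat d
  if cat = 3 then
    (if PySem.Str.isIn "pku" d || PySem.Str.isIn "phenylketonuria" d then
      ["phenylalanine", "tyrosine"]
     else if PySem.Str.isIn "msud" d || PySem.Str.isIn "maple syrup" d then
      ["leucine", "isoleucine", "valine"]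
     else if PySem.Str.isIn "galactosemia" d then
      ["galactose_1_phosphate", "galt_activity"]
     else []) ++ ["albumin"]
  else if cat = 8 then
    (if ["ibd", "crohn", "ulcerative colitis", "inflammatory bowel"].any
          (fun t => PySem.Str.isIn t d) then
      ["crp", "esr", "fecal_calprotectin", "albumin"]
     else []) ++
    (if PySem.Str.isIn "gerd" d || PySem.Str.isIn "reflux" d then ["symptom_frequency"] else [])
  else PySem.Dict.getD pvStaticSlots cat []

-- ===== PRECONDITION & SPEC =====
def Spec_get_biomarker_questions_FIXED_py (diagnosis : String) (out : List String) : Prop := out = get_biomarker_questions_FIXED_py_alt diagnosis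
instance (diagnosis : String) (out : List String) : Decidable (Spec_get_biomarker_questions_FIXED_py diagnosis out) := by unfold Spec_get_biomarker_questions_FIXED_py; infer_instance

-- ===== CLAIM =====
def Claim_equal_get_biomarker_questions_FIXED_py : Prop := ∀ (diagnosis : String), Dom_get_biomarker_questions_FIXED_py diagnosis → Spec_get_biomarker_questions_FIXED_py diagnosis (get_biomarker_questions_FIXED_py diagnosis)

-- ===== LEMMAS AND PROOFS =====

-- min(hs, default=9) of a list with values in 1..8 picks the smallest present value
theorem pv_min_getD_char (hs : List Int) (hb : ∀ x ∈ hs, 1 ≤ x ∧ x ≤ 8) :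
    (PySem.List.min? hs (fun x => x)).getD 9 =
    if (1 : Int) ∈ hs then 1 else if (2 : Int) ∈ hs then 2 else if (3 : Int) ∈ hs then 3
    else if (4 : Int) ∈ hs then 4 else if (5 : Int) ∈ hs then 5 else if (6 : Int) ∈ hs then 6
    else if (7 : Int) ∈ hs then 7 else if (8 : Int) ∈ hs then 8 else 9 := by
  rcases hs with _ | ⟨x, t⟩
  · simp [(PySem.List.min?_eq_none_iff ([] : List Int) (fun x => x)).2 rfl]
  · have hm : (PySem.List.min? (x :: t) fun y => y) = some (List.foldl min x t) :=
      PySem.List.min?_id_cons x t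
    have hmem : List.foldl min x t ∈ x :: t := PySem.List.min?_mem hm
    have hle : ∀ y ∈ x :: t, List.foldl min x t ≤ y := PySem.List.min?_isMin hm
    obtain ⟨hlo, hhi⟩ := hb _ hmem
    rw [hm, Option.getD_some]
    have hne : ∀ k : Int, k ∉ x :: t → List.foldl min x t ≠ k := fun k hk e => hk (e ▸ hmem)
    split_ifs with h1 h2 h3 h4 h5 h6 h7 h8
    · have := hle 1 h1; omega
    · have := hle 2 h2; have := hne 1 h1; omega
    · have := hle 3 h3; have := hne 1 h1; have := hne 2 h2; omega
    · have := hle 4 h4; have := hne 1 h1; have := hne 2 h2; have := hne 3 h3; omega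
    · have := hle 5 h5; have := hne 1 h1; have := hne 2 h2; have := hne 3 h3
      have := hne 4 h4; omega
    · have := hle 6 h6; have := hne 1 h1; have := hne 2 h2; have := hne 3 h3
      have := hne 4 h4; have := hne 5 h5; omega
    · have := hle 7 h7; have := hne 1 h1; have := hne 2 h2; have := hne 3 h3
      have := hne 4 h4; have := hne 5 h5; have := hne 6 h6; omega
    · have := hle 8 h8; have := hne 1 h1; have := hne 2 h2; have := hne 3 h3
      have := hne 4 h4; have := hne 5 h5; have := hne 6 h6; have := hne 7 h7; omega
    · have := hne 1 h1; have := hne 2 h2; have := hne 3 h3; have := hne 4 h4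
      have := hne 5 h5; have := hne 6 h6; have := hne 7 h7; have := hne 8 h8; omega

-- every collected category is one of 1..8
theorem pv_hits_bound (d : String) : ∀ x ∈ pvHits d, 1 ≤ x ∧ x ≤ 8 := by
  intro x hx
  have hx' : x ∈ pvKeywords.map Prod.snd ++ [(5 : Int), 7] := by
    rcases List.mem_append.1 hx with h | h
    · rcases List.mem_append.1 h with h | h
      · rcases List.mem_filterMap.1 h with ⟨a, ha, hfa⟩
        simp only [Option.ite_none_right_eq_some, Option.some.injEq] at hfa
        exact List.mem_append_left _ (hfa.2 ▸ List.mem_map_of_mem ha)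
      · refine List.mem_append_right _ ?_
        split at h <;> simp_all
    · refine List.mem_append_right _ ?_
      split at h <;> simp_all
  exact (by decide : ∀ y ∈ pvKeywords.map Prod.snd ++ [(5 : Int), 7], 1 ≤ y ∧ y ≤ 8) x hx'

-- the numeric minimum of the collected categories equals A's first-match cascade index
set_option maxHeartbeats 3200000 in
theorem pvCat_char (d : String) : pvCat d =
    if PySem.Str.isIn "diabet" d || PySem.Str.isIn "t1d" d || PySem.Str.isIn "iddm" d then 1
    else if PySem.Str.isIn "ckd" d || PySem.Str.isIn "kidney" d || PySem.Str.isIn "renal" d then 2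
    else if ["pku", "phenylketonuria", "msud", "maple syrup", "galactosemia",
             "metabolic disorder", "inborn error"].any (fun t => PySem.Str.isIn t d) then 3
    else if PySem.Str.isIn "epilep" d || PySem.Str.isIn "seizure" d ||
            PySem.Str.isIn "ketogenic" d || PySem.Str.isIn "keto" d then 4
    else if PySem.Str.isIn "cystic fibrosis" d ||
            (PySem.Str.isIn "cf" d && decide (PySem.Str.len d ≤ 5)) || PySem.Str.isIn "cftr" d then 5
    else if PySem.Str.isIn "preterm" d || PySem.Str.isIn "premature" d ||
            PySem.Str.isIn "nicu" d || PySem.Str.isIn "preemie" d then 6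
    else if PySem.Str.isIn "food allerg" d ||
            (PySem.Str.isIn "allergic" d && !PySem.Str.isIn "food" d) ||
            PySem.Str.isIn "anaphylaxis" d then 7
    else if ["ibd", "crohn", "ulcerative colitis", "gerd", "reflux",
             "inflammatory bowel"].any (fun t => PySem.Str.isIn t d) then 8
    else 9 := by
  have h1 : ((1 : Int) ∈ pvHits d) ↔
      (PySem.Str.isIn "diabet" d || PySem.Str.isIn "t1d" d || PySem.Str.isIn "iddm" d) = true := by
    simp only [pvHits, pvKeywords, List.mem_append, List.mem_filterMap,
      List.exists_mem_cons_iff, List.not_mem_nil, List.mem_ite_nil_right,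
      Option.ite_none_right_eq_some, Option.some.injEq,
      Bool.or_eq_true, Bool.and_eq_true, decide_eq_true_eq,
      List.any_cons, List.any_nil, Bool.or_false, List.mem_singleton, exists_eq_left,
      exists_false, or_false, false_or, Int.reduceEq, and_false, and_true, false_and]
    all_goals simp only [or_assoc, or_left_comm, or_comm, and_assoc, and_left_comm, and_comm]
  have h2 : ((2 : Int) ∈ pvHits d) ↔
      (PySem.Str.isIn "ckd" d || PySem.Str.isIn "kidney" d || PySem.Str.isIn "renal" d) = true := by
    simp only [pvHits, pvKeywords, List.mem_append, List.mem_filterMap,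
      List.exists_mem_cons_iff, List.not_mem_nil, List.mem_ite_nil_right,
      Option.ite_none_right_eq_some, Option.some.injEq,
      Bool.or_eq_true, Bool.and_eq_true, decide_eq_true_eq,
      List.any_cons, List.any_nil, Bool.or_false, List.mem_singleton, exists_eq_left,
      exists_false, or_false, false_or, Int.reduceEq, and_false, and_true, false_and]
    all_goals simp only [or_assoc, or_left_comm, or_comm, and_assoc, and_left_comm, and_comm]
  have h3 : ((3 : Int) ∈ pvHits d) ↔
      (["pku", "phenylketonuria", "msud", "maple syrup", "galactosemia",
        "metabolic disorder", "inborn error"].any (fun t => PySem.Str.isIn t d)) = true := by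
    simp only [pvHits, pvKeywords, List.mem_append, List.mem_filterMap,
      List.exists_mem_cons_iff, List.not_mem_nil, List.mem_ite_nil_right,
      Option.ite_none_right_eq_some, Option.some.injEq,
      Bool.or_eq_true, Bool.and_eq_true, decide_eq_true_eq,
      List.any_cons, List.any_nil, Bool.or_false, List.mem_singleton, exists_eq_left,
      exists_false, or_false, false_or, Int.reduceEq, and_false, and_true, false_and]
  have h4 : ((4 : Int) ∈ pvHits d) ↔
      (PySem.Str.isIn "epilep" d || PySem.Str.isIn "seizure" d ||
       PySem.Str.isIn "ketogenic" d || PySem.Str.isIn "keto" d) = true := by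
    simp only [pvHits, pvKeywords, List.mem_append, List.mem_filterMap,
      List.exists_mem_cons_iff, List.not_mem_nil, List.mem_ite_nil_right,
      Option.ite_none_right_eq_some, Option.some.injEq,
      Bool.or_eq_true, Bool.and_eq_true, decide_eq_true_eq,
      List.any_cons, List.any_nil, Bool.or_false, List.mem_singleton, exists_eq_left,
      exists_false, or_false, false_or, Int.reduceEq, and_false, and_true, false_and]
    all_goals simp only [or_assoc, or_left_comm, or_comm, and_assoc, and_left_comm, and_comm]
  have h5 : ((5 : Int) ∈ pvHits d) ↔
      (PySem.Str.isIn "cystic fibrosis" d ||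
       (PySem.Str.isIn "cf" d && decide (PySem.Str.len d ≤ 5)) || PySem.Str.isIn "cftr" d) = true := by
    simp only [pvHits, pvKeywords, List.mem_append, List.mem_filterMap,
      List.exists_mem_cons_iff, List.not_mem_nil, List.mem_ite_nil_right,
      Option.ite_none_right_eq_some, Option.some.injEq,
      Bool.or_eq_true, Bool.and_eq_true, decide_eq_true_eq,
      List.any_cons, List.any_nil, Bool.or_false, List.mem_singleton, exists_eq_left,
      exists_false, or_false, false_or, Int.reduceEq, and_false, and_true, false_and]
    all_goals simp only [or_assoc, or_left_comm, or_comm, and_assoc, and_left_comm, and_comm]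
  have h6 : ((6 : Int) ∈ pvHits d) ↔
      (PySem.Str.isIn "preterm" d || PySem.Str.isIn "premature" d ||
       PySem.Str.isIn "nicu" d || PySem.Str.isIn "preemie" d) = true := by
    simp only [pvHits, pvKeywords, List.mem_append, List.mem_filterMap,
      List.exists_mem_cons_iff, List.not_mem_nil, List.mem_ite_nil_right,
      Option.ite_none_right_eq_some, Option.some.injEq,
      Bool.or_eq_true, Bool.and_eq_true, decide_eq_true_eq,
      List.any_cons, List.any_nil, Bool.or_false, List.mem_singleton, exists_eq_left,
      exists_false, or_false, false_or, Int.reduceEq, and_false, and_true, false_and]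
    all_goals simp only [or_assoc, or_left_comm, or_comm, and_assoc, and_left_comm, and_comm]
  have h7 : ((7 : Int) ∈ pvHits d) ↔
      (PySem.Str.isIn "food allerg" d ||
       (PySem.Str.isIn "allergic" d && !PySem.Str.isIn "food" d) ||
       PySem.Str.isIn "anaphylaxis" d) = true := by
    simp only [pvHits, pvKeywords, List.mem_append, List.mem_filterMap,
      List.exists_mem_cons_iff, List.not_mem_nil, List.mem_ite_nil_right,
      Option.ite_none_right_eq_some, Option.some.injEq,
      Bool.or_eq_true, Bool.and_eq_true, decide_eq_true_eq,
      List.any_cons, List.any_nil, Bool.or_false, List.mem_singleton, exists_eq_left,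
      exists_false, or_false, false_or, Int.reduceEq, and_false, and_true, false_and]
    all_goals simp only [or_assoc, or_left_comm, or_comm, and_assoc, and_left_comm, and_comm]
  have h8 : ((8 : Int) ∈ pvHits d) ↔
      (["ibd", "crohn", "ulcerative colitis", "gerd", "reflux",
        "inflammatory bowel"].any (fun t => PySem.Str.isIn t d)) = true := by
    simp only [pvHits, pvKeywords, List.mem_append, List.mem_filterMap,
      List.exists_mem_cons_iff, List.not_mem_nil, List.mem_ite_nil_right,
      Option.ite_none_right_eq_some, Option.some.injEq,
      Bool.or_eq_true, Bool.and_eq_true, decide_eq_true_eq,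
      List.any_cons, List.any_nil, Bool.or_false, List.mem_singleton, exists_eq_left,
      exists_false, or_false, false_or, Int.reduceEq, and_false, and_true, false_and]
  unfold pvCat
  rw [pv_min_getD_char (pvHits d) (pv_hits_bound d)]
  simp only [h1, h2, h3, h4, h5, h6, h7, h8]

-- ===== VERDICT =====
set_option maxHeartbeats 2000000 in
theorem get_biomarker_questions_FIXED_py_spec : Claim_equal_get_biomarker_questions_FIXED_py := by
  intro diagnosis _
  unfold Spec_get_biomarker_questions_FIXED_py
  unfold get_biomarker_questions_FIXED_py get_biomarker_questions_FIXED_py_alt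
  simp only []
  generalize PySem.Str.lower (if diagnosis = "" then "" else diagnosis) = dl
  rw [pvCat_char dl]
  simp only [apply_ite (fun c : Int =>
      if c = 3 then
        (if PySem.Str.isIn "pku" dl || PySem.Str.isIn "phenylketonuria" dl then
          ["phenylalanine", "tyrosine"]
         else if PySem.Str.isIn "msud" dl || PySem.Str.isIn "maple syrup" dl then
          ["leucine", "isoleucine", "valine"]
         else if PySem.Str.isIn "galactosemia" dl then
          ["galactose_1_phosphate", "galt_activity"]
         else []) ++ ["albumin"]
      else if c = 8 then
        (if ["ibd", "crohn", "ulcerative colitis", "inflammatory bowel"].any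
              (fun t => PySem.Str.isIn t dl) then
          ["crp", "esr", "fecal_calprotectin", "albumin"]
         else []) ++
        (if PySem.Str.isIn "gerd" dl || PySem.Str.isIn "reflux" dl then ["symptom_frequency"] else [])
      else PySem.Dict.getD pvStaticSlots c []),
    Int.reduceEq, if_true, if_false]
  split_ifs <;> rfl
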